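-- pv_equiv track=rewrite | github.com/Avassaa/discrete_II | graph_isomorphism_gameoflife_latest.py | compare_color_distributions
-- ===== SOURCE A (Python) =====
-- def compare_color_distributions(color_mapping1, color_mapping2):
--     return (
--             sum(1 for color in color_mapping1.values() if color == 'red') == sum(
--         1 for color in color_mapping2.values() if color == 'red') and
--             sum(1 for color in color_mapping1.values() if color == 'green') == sum(
--         1 for color in color_mapping2.values() if color == 'green') and
--             sum(1 for color in color_mapping1.values() if color == 'blue') == sum(
--         1 for color in color_mapping2.values() if color == 'blue') and
--             sum(1 for color in color_mapping1.values() if color == 'yellow') == sum(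
--         1 for color in color_mapping2.values() if color == 'yellow')
--     )
-- ===== SOURCE B (Python) =====
-- def compare_color_distributions(color_mapping1, color_mapping2):
--     # Multiset view: the four tracked colour counts agree iff the two value
--     # sequences, restricted to the tracked colours, are equal as multisets,
--     # i.e. equal once sorted.
--     tracked = ('red', 'green', 'blue', 'yellow')
--     return sorted(v for v in color_mapping1.values() if v in tracked) == \
--            sorted(v for v in color_mapping2.values() if v in tracked)
-- ===== Notes on version B (the rewrite author's own statement) =====
-- stated objective: alternative
-- what changed: Instead of counting each of the four colours with eight filtered scans, B filters each mapping's values down to the tracked colours and compares the two sorted restrictions for equality (multiset equality), so no counts are ever computed.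
import Mathlib
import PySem

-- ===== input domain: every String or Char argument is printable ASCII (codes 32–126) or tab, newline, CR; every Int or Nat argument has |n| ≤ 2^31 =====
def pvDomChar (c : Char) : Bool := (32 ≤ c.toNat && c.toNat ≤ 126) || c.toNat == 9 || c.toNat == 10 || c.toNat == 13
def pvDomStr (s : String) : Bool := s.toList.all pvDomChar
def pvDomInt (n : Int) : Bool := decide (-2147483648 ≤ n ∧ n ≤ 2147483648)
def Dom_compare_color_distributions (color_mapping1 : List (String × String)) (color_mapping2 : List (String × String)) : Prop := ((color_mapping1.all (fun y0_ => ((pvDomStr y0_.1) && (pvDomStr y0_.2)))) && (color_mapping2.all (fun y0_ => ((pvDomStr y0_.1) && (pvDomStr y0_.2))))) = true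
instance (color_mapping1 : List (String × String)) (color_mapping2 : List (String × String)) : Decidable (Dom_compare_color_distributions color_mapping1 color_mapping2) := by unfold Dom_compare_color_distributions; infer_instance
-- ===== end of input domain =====

-- B replaces A's eight per-colour filtered counting scans by filtering each mapping's
-- values to the four tracked colours and comparing the two sorted restrictions
-- (multiset equality); equivalence is proved on all inputs.

-- ===== PORT A =====
-- sum(1 for color in mapping.values() if color == c)  : a 0/1-generator sum over the values
def pvSumColor (mapping : List (String × String)) (c : String) : Int :=
  (((mapping.map (·.2)).filter (fun v => v == c)).map (fun _ => (1 : Int))).sum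

def compare_color_distributions (color_mapping1 : List (String × String)) (color_mapping2 : List (String × String)) : Bool :=
  (pvSumColor color_mapping1 "red" == pvSumColor color_mapping2 "red") &&
  (pvSumColor color_mapping1 "green" == pvSumColor color_mapping2 "green") &&
  (pvSumColor color_mapping1 "blue" == pvSumColor color_mapping2 "blue") &&
  (pvSumColor color_mapping1 "yellow" == pvSumColor color_mapping2 "yellow")

-- ===== PORT B =====
-- sorted(v for v in mapping.values() if v in tracked)
def pvTrackedRestriction (mapping : List (String × String)) : List String :=
  PySem.List.sorted ((mapping.map (·.2)).filter
    (fun v => ["red", "green", "blue", "yellow"].contains v)) (fun x => x) false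

def compare_color_distributions_alt (color_mapping1 : List (String × String)) (color_mapping2 : List (String × String)) : Bool :=
  pvTrackedRestriction color_mapping1 == pvTrackedRestriction color_mapping2

-- ===== PRECONDITION & SPEC =====
def Spec_compare_color_distributions (color_mapping1 : List (String × String)) (color_mapping2 : List (String × String)) (out : Bool) : Prop := out = compare_color_distributions_alt color_mapping1 color_mapping2
instance (color_mapping1 : List (String × String)) (color_mapping2 : List (String × String)) (out : Bool) : Decidable (Spec_compare_color_distributions color_mapping1 color_mapping2 out) := by unfold Spec_compare_color_distributions; infer_instance

-- ===== CLAIM (what is proved, stated in full; the proofs are below) =====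
def Claim_equal_compare_color_distributions : Prop := ∀ (color_mapping1 : List (String × String)) (color_mapping2 : List (String × String)), Dom_compare_color_distributions color_mapping1 color_mapping2 → Spec_compare_color_distributions color_mapping1 color_mapping2 (compare_color_distributions color_mapping1 color_mapping2)

-- ===== LEMMAS AND PROOFS =====
-- A's 0/1-sum for colour c is the count of c among the values, as an Int
theorem pvSumColor_eq_count (mapping : List (String × String)) (c : String) :
    pvSumColor mapping c = ((mapping.map (·.2)).count c : Int) := by
  unfold pvSumColor
  rw [PySem.List.sum_map_const_int]
  simp [List.count_eq_countP, List.countP_eq_length_filter]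

-- A is true iff the four tracked counts agree
theorem portA_iff (m1 m2 : List (String × String)) :
    compare_color_distributions m1 m2 = true ↔
      ((m1.map (·.2)).count "red" = (m2.map (·.2)).count "red" ∧
       (m1.map (·.2)).count "green" = (m2.map (·.2)).count "green" ∧
       (m1.map (·.2)).count "blue" = (m2.map (·.2)).count "blue" ∧
       (m1.map (·.2)).count "yellow" = (m2.map (·.2)).count "yellow") := by
  unfold compare_color_distributions
  simp only [pvSumColor_eq_count, Bool.and_eq_true, beq_iff_eq]
  constructor
  · rintro ⟨⟨⟨h1, h2⟩, h3⟩, h4⟩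
    exact ⟨by exact_mod_cast h1, by exact_mod_cast h2, by exact_mod_cast h3, by exact_mod_cast h4⟩
  · rintro ⟨h1, h2, h3, h4⟩
    exact ⟨⟨⟨by exact_mod_cast h1, by exact_mod_cast h2⟩, by exact_mod_cast h3⟩, by exact_mod_cast h4⟩

-- B is true iff the two tracked restrictions are permutations of each other
theorem portB_iff (m1 m2 : List (String × String)) :
    compare_color_distributions_alt m1 m2 = true ↔
      ((m1.map (·.2)).filter (fun v => ["red", "green", "blue", "yellow"].contains v)).Perm
      ((m2.map (·.2)).filter (fun v => ["red", "green", "blue", "yellow"].contains v)) := by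
  unfold compare_color_distributions_alt pvTrackedRestriction
  rw [beq_iff_eq]
  exact PySem.List.sorted_id_eq_sorted_id_iff_perm _ _

-- ===== VERDICT (by name: the statement is the Claim_ definition above) =====
theorem compare_color_distributions_spec : Claim_equal_compare_color_distributions := by
  intro m1 m2 _
  unfold Spec_compare_color_distributions
  rw [Bool.eq_iff_iff, portA_iff, portB_iff]
  rw [List.perm_iff_count]
  constructor
  · rintro ⟨h1, h2, h3, h4⟩ c
    by_cases hc : (["red", "green", "blue", "yellow"].contains c) = true
    · rw [List.count_filter hc, List.count_filter hc]
      rcases (by simpa using hc : c = "red" ∨ c = "green" ∨ c = "blue" ∨ c = "yellow")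
        with rfl | rfl | rfl | rfl <;> assumption
    · rw [List.count_eq_zero.mpr, List.count_eq_zero.mpr] <;>
        exact fun hm => hc (List.mem_filter.mp hm).2
  · intro h
    refine ⟨?_, ?_, ?_, ?_⟩ <;>
      [have := h "red"; have := h "green"; have := h "blue"; have := h "yellow"] <;>
      rwa [List.count_filter (by decide), List.count_filter (by decide)] at this
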